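-- pv_equiv track=rewrite | github.com/BGCX261/zmetadata-svn-to-git | trunk/ZCoGIS/CoGIS/UniversalMapServer.py | _wmsNameinWfsNames
-- ===== SOURCE A (Python) =====
-- def _wmsNameinWfsNames(wmsName,wfsNames):
--     """
--     @summary: get the list index for the wms name that matched a part of a wfs name
--     returns -1 if no match was found
--     @param wmsName: the wms name to look for in wfsNames
--     @param wfsNames: a list if wfs names
--     """
--     if wmsName in wfsNames:
--         index = wfsNames.index(wmsName)
--         return index
--
--     # filter for arcims matching
--     count = 0
--     for name in wfsNames:
--         tmpName = name.split("-")[0]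
--         if wmsName.lower() == tmpName.lower():
--             return count
--         count += 1
--     return -1;
-- ===== SOURCE B (Python) =====
-- def _wmsNameinWfsNames(wmsName, wfsNames):
--     """Single enumerate pass keeping two accumulators (first exact index,
--     first case-insensitive prefix-before-'-' index) instead of A's
--     membership test + .index + second loop."""
--     lower = wmsName.lower()
--     exact = -1
--     prefix = -1
--     for i, name in enumerate(wfsNames):
--         if exact == -1 and name == wmsName:
--             exact = i
--         if prefix == -1 and lower == name.split("-")[0].lower():
--             prefix = i
--     return exact if exact != -1 else prefix
-- ===== Notes on version B (the rewrite author's own statement) =====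
-- stated objective: faster
-- what changed: Replaces A's membership test + .index() pass plus a separate counted prefix-matching loop (which recomputes wmsName.lower() on every iteration) with one enumerate traversal maintaining two accumulators (first exact index, first prefix index), with wmsName.lower() hoisted out of the loop; exact beats prefix at the end.
import Mathlib
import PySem

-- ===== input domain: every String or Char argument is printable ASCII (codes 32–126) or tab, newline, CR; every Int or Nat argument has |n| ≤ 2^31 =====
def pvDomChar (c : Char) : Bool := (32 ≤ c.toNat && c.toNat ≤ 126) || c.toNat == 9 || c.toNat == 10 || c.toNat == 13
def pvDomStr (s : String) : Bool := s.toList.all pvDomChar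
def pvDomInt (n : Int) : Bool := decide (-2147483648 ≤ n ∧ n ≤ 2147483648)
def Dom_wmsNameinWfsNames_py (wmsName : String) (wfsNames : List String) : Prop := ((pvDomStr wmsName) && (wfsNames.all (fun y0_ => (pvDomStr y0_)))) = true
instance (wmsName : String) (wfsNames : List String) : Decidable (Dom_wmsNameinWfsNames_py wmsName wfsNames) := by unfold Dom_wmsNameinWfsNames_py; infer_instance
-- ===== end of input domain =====

-- B replaces A's membership+index pass and separate counted prefix loop with one enumerate
-- traversal keeping two accumulators, hoisting wmsName.lower() out of the loop (timing run measured B faster).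

-- name.split("-")[0]  (sep is the non-empty literal "-", so split? always returns some)
def pvSplitHead (name : String) : String := ((PySem.Str.split? name "-").getD []).headD ""

-- ===== PORT A =====
-- the 'for name in wfsNames: ... count += 1' loop of A, with its running count
def pvLoopA (wmsName : String) : List String → Int → Int
  | [], _ => -1
  | name :: rest, count =>
    let tmpName := pvSplitHead name
    if PySem.Str.lower wmsName == PySem.Str.lower tmpName then count
    else pvLoopA wmsName rest (count + 1)

def wmsNameinWfsNames_py (wmsName : String) (wfsNames : List String) : Int :=
  if wmsName ∈ wfsNames then
    match PySem.List.index? wfsNames wmsName with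
    | some i => (i : Int)
    | none => -1   -- unreachable: guarded by the membership test
  else
    pvLoopA wmsName wfsNames 0

-- ===== PORT B =====
def pvStepB (wmsName : String) (st : Int × Int) (iname : Int × String) : Int × Int :=
  (if st.1 == -1 && iname.2 == wmsName then iname.1 else st.1,
   if st.2 == -1 && PySem.Str.lower wmsName == PySem.Str.lower (pvSplitHead iname.2) then iname.1 else st.2)

def wmsNameinWfsNames_py_alt (wmsName : String) (wfsNames : List String) : Int :=
  let st := (PySem.List.enumerate wfsNames 0).foldl (pvStepB wmsName) (-1, -1)
  if st.1 != -1 then st.1 else st.2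

-- ===== PRECONDITION & SPEC =====
def Spec_wmsNameinWfsNames_py (wmsName : String) (wfsNames : List String) (out : Int) : Prop := out = wmsNameinWfsNames_py_alt wmsName wfsNames
instance (wmsName : String) (wfsNames : List String) (out : Int) : Decidable (Spec_wmsNameinWfsNames_py wmsName wfsNames out) := by unfold Spec_wmsNameinWfsNames_py; infer_instance

-- ===== CLAIM (what is proved, stated in full; the proofs are below) =====
def Claim_equal_wmsNameinWfsNames_py : Prop := ∀ (wmsName : String) (wfsNames : List String), Dom_wmsNameinWfsNames_py wmsName wfsNames → Spec_wmsNameinWfsNames_py wmsName wfsNames (wmsNameinWfsNames_py wmsName wfsNames)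

-- ===== LEMMAS AND PROOFS =====

-- index (starting at s) of the first element satisfying P, or -1
def pvFirstIdx (P : String → Bool) : List String → Int → Int
  | [], _ => -1
  | x :: r, s => if P x then s else pvFirstIdx P r (s + 1)

-- B's matching predicates
def pvPexact (wmsName : String) : String → Bool := fun n => n == wmsName
def pvPpre (wmsName : String) : String → Bool :=
  fun n => PySem.Str.lower wmsName == PySem.Str.lower (pvSplitHead n)

theorem pvStepB_eq (wmsName : String) (st : Int × Int) (iname : Int × String) :
    pvStepB wmsName st iname =
      (if st.1 == -1 && pvPexact wmsName iname.2 then iname.1 else st.1,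
       if st.2 == -1 && pvPpre wmsName iname.2 then iname.1 else st.2) := rfl

theorem pvFold_eq (wmsName : String) (xs : List String) :
    ∀ (s e p : Int), 0 ≤ s →
      (PySem.List.enumerate xs s).foldl (pvStepB wmsName) (e, p) =
        ((if e == -1 then pvFirstIdx (pvPexact wmsName) xs s else e),
         (if p == -1 then pvFirstIdx (pvPpre wmsName) xs s else p)) := by
  induction xs with
  | nil => intro s e p hs; simp [PySem.List.enumerate_nil, pvFirstIdx]
  | cons x r ih =>
    intro s e p hs
    rw [PySem.List.enumerate_cons]
    simp only [List.foldl_cons, pvStepB_eq]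
    rw [ih (s + 1) _ _ (by omega)]
    simp only [pvFirstIdx, Prod.mk.injEq]
    constructor <;>
      by_cases hP : pvPexact wmsName x <;> by_cases hQ : pvPpre wmsName x <;>
      by_cases he : e = -1 <;> by_cases hp : p = -1 <;>
      simp [hP, hQ, he, hp] <;> omega

theorem pvLoopA_eq_firstIdx (wmsName : String) (xs : List String) :
    ∀ c, pvLoopA wmsName xs c = pvFirstIdx (pvPpre wmsName) xs c := by
  induction xs with
  | nil => intro c; rfl
  | cons x r ih =>
    intro c
    simp only [pvLoopA, pvFirstIdx, pvPpre]
    by_cases h : PySem.Str.lower wmsName == PySem.Str.lower (pvSplitHead x) <;>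
      simp [h, ih]

theorem pvFirstIdx_exact (wmsName : String) (xs : List String) :
    ∀ s : Int, 0 ≤ s →
      pvFirstIdx (pvPexact wmsName) xs s =
        (match PySem.List.index? xs wmsName with
         | some i => s + (i : Int)
         | none => -1) := by
  induction xs with
  | nil =>
    intro s hs
    simp [pvFirstIdx, PySem.List.index?_eq_idxOf?]
  | cons x r ih =>
    intro s hs
    by_cases hx : x = wmsName
    · subst hx
      rw [PySem.List.index?_cons_self]
      simp [pvFirstIdx, pvPexact]
    · rw [PySem.List.index?_cons_of_ne r hx]
      have hb : pvPexact wmsName x = false := by simp [pvPexact, hx]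
      simp only [pvFirstIdx, hb, if_neg, Bool.false_eq_true, not_false_iff]
      rw [ih (s + 1) (by omega)]
      cases h : PySem.List.index? r wmsName with
      | none => simp
      | some i => simp; ring

-- ===== VERDICT (by name: the statement is the Claim_ definition above) =====
theorem wmsNameinWfsNames_py_spec : Claim_equal_wmsNameinWfsNames_py := by
  intro wmsName wfsNames _
  unfold Spec_wmsNameinWfsNames_py wmsNameinWfsNames_py wmsNameinWfsNames_py_alt
  rw [pvFold_eq wmsName wfsNames 0 (-1) (-1) (by omega)]
  rw [pvFirstIdx_exact wmsName wfsNames 0 (by omega)]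
  by_cases hmem : wmsName ∈ wfsNames
  · rw [if_pos hmem]
    cases h : PySem.List.index? wfsNames wmsName with
    | none =>
      rw [PySem.List.index?_eq_none_iff] at h
      exact absurd hmem h
    | some i =>
      have : ((i : Int) != -1) = true := by simp
      simp [this]
  · rw [if_neg hmem]
    have hnone : PySem.List.index? wfsNames wmsName = none := by
      rw [PySem.List.index?_eq_none_iff]; exact hmem
    rw [PySem.List.index?_eq_idxOf?] at hnone
    simp [hnone, pvLoopA_eq_firstIdx]
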